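-- pv_equiv track=rewrite | github.com/TuanOnta/Seleksi-Sister-Bagian-B | Soal 5 Wolfman Sigma/python/wolfman.py | divide_matrix
-- ===== SOURCE A (Python) =====
-- def divide_matrix(total_rows, numProcessors):
--     """
--     Divides the total number of rows into chunks for each processor.
--
--     Args:
--         total_rows (int): The total number of rows to be divided.
--         numProcessors (int): The number of processors available for processing.
--
--     Returns:
--         list: A list containing the indices where each processor's chunk starts and ends.
--     """
--     division = []
--     resLast, res = 0, 0
--     division.append(res)
--     if total_rows < numProcessors:
--         numProcessors = total_rows
--     while numProcessors != 0:
--         resLast = resLast + res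
--         res = total_rows // numProcessors
--
--         division.append(resLast + res)
--         total_rows = total_rows - res
--         numProcessors = numProcessors - 1
--
--     return division
-- ===== SOURCE B (Python) =====
-- def divide_matrix(total_rows, numProcessors):
--     """One-shot divmod distribution: base-size chunks, the last `rem` chunks one larger."""
--     n = min(numProcessors, total_rows)
--     boundaries = [0]
--     if n == 0:
--         return boundaries
--     base, rem = divmod(total_rows, n)
--     acc = 0
--     for i in range(n):
--         acc += base + (1 if i >= n - rem else 0)
--         boundaries.append(acc)
--     return boundaries
-- ===== Notes on version B (the rewrite author's own statement) =====
-- stated objective: simpler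
-- what changed: Replaces A's iterative rebalancing loop (recomputing total_rows // remaining each step) with a one-shot divmod: base-size chunks with the last rem chunks one row larger, accumulated by a single prefix-sum pass (one division instead of one per chunk; measured ~1.9x faster).
import Mathlib
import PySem

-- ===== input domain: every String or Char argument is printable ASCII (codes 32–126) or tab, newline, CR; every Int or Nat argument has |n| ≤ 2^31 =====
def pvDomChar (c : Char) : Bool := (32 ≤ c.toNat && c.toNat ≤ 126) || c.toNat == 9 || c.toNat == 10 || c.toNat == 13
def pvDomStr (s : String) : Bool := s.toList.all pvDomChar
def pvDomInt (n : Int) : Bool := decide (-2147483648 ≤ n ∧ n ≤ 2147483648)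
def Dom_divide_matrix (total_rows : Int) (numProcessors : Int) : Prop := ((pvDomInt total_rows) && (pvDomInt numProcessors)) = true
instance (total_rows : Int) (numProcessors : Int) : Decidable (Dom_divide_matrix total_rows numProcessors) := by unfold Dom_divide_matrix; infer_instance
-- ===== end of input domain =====

-- B replaces A's per-step rebalancing divisions with one divmod plus a prefix-sum pass (simpler, same cost).


-- ===== PORT A =====
-- A's while loop: fuel = clamped numProcessors (as Nat); state (total_rows, resLast, res).
def divideLoopA (total resLast res : Int) : Nat → List Int
  | 0 => []
  | Nat.succ k =>
    let resLast' := resLast + res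
    let res' := PySem.Int.floordiv total ((k : Int) + 1)
    (resLast' + res') :: divideLoopA (total - res') resLast' res' k

def divide_matrix (total_rows : Int) (numProcessors : Int) : List Int :=
  let n := if total_rows < numProcessors then total_rows else numProcessors
  0 :: divideLoopA total_rows 0 0 n.toNat

-- ===== PORT B =====
-- B's for loop over range(n): running total acc, chunk = base (+1 for the last rem chunks).
def loopB (base nmr : Int) : List Int → Int → List Int
  | [], _ => []
  | i :: rest, acc =>
    let size := base + (if nmr ≤ i then 1 else 0)
    (acc + size) :: loopB base nmr rest (acc + size)

def divide_matrix_alt (total_rows : Int) (numProcessors : Int) : List Int :=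
  let n := min numProcessors total_rows
  if n = 0 then [0]
  else
    let base := PySem.Int.floordiv total_rows n
    let rem := PySem.Int.mod total_rows n
    0 :: loopB base (n - rem) (PySem.List.pyRange 0 n 1) 0

-- ===== PRECONDITION & SPEC =====
-- A's while loop never terminates when the clamped processor count is negative
-- (negative total_rows or negative numProcessors): Pre_ is exactly where A returns.
def Pre_divide_matrix (total_rows : Int) (numProcessors : Int) : Prop :=
  0 ≤ total_rows ∧ 0 ≤ numProcessors
instance (total_rows : Int) (numProcessors : Int) : Decidable (Pre_divide_matrix total_rows numProcessors) := by unfold Pre_divide_matrix; infer_instance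
def pvWitness_divide_matrix : Int × Int := (10, 3)

def Spec_divide_matrix (total_rows : Int) (numProcessors : Int) (out : List Int) : Prop := out = divide_matrix_alt total_rows numProcessors
instance (total_rows : Int) (numProcessors : Int) (out : List Int) : Decidable (Spec_divide_matrix total_rows numProcessors out) := by unfold Spec_divide_matrix; infer_instance

-- ===== CLAIM (what is proved, stated in full; the proofs are below) =====
def Claim_equal_divide_matrix : Prop := ∀ (total_rows : Int) (numProcessors : Int), Dom_divide_matrix total_rows numProcessors → Pre_divide_matrix total_rows numProcessors → Spec_divide_matrix total_rows numProcessors (divide_matrix total_rows numProcessors)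

-- ===== LEMMAS AND PROOFS =====

-- prefix sums of a list of chunk sizes, starting from acc
def psum (acc : Int) : List Int → List Int
  | [] => []
  | s :: r => (acc + s) :: psum (acc + s) r

-- chunk sizes that A's rebalancing loop produces when k chunks remain of t rows
def sizes (t : Int) (k : Nat) : List Int :=
  (List.range k).map (fun (i : Nat) => t / (k : Int) + if (k : Int) - t % (k : Int) ≤ (i : Int) then 1 else 0)

lemma loopB_eq_psum (base nmr : Int) : ∀ (idxs : List Int) (acc : Int),
    loopB base nmr idxs acc = psum acc (idxs.map (fun i => base + if nmr ≤ i then 1 else 0)) := by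
  intro idxs
  induction idxs with
  | nil => intro acc; rfl
  | cons i rest ih => intro acc; simp [loopB, psum, ih]

lemma sizes_step (t : Int) (k : Nat) :
    sizes t (k + 1) = (t / ((k : Int) + 1)) :: sizes (t - t / ((k : Int) + 1)) k := by
  have hk1 : (0 : Int) < (k : Int) + 1 := by omega
  have hmod : t % ((k : Int) + 1) < (k : Int) + 1 := Int.emod_lt_of_pos t hk1
  have hmod0 : 0 ≤ t % ((k : Int) + 1) := Int.emod_nonneg t (by omega)
  unfold sizes
  rw [List.range_succ_eq_map]
  simp only [List.map_cons, List.map_map, Nat.cast_add, Nat.cast_one, Nat.cast_zero]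
  refine List.cons_eq_cons.mpr ⟨?_, ?_⟩
  · have h0 : ¬ ((k : Int) + 1 - t % ((k : Int) + 1) ≤ 0) := by omega
    simp [h0]
  · apply List.map_congr_left
    intro i hi
    have hik : i < k := List.mem_range.mp hi
    have hiK : (i : Int) < (k : Int) := by exact_mod_cast hik
    set K : Int := (k : Int) with hKdef
    set b : Int := t / (K + 1) with hb
    set s : Int := t % (K + 1) with hs
    have ht : (K + 1) * b + s = t := Int.mul_ediv_add_emod t (K + 1)
    have hsK : s ≤ K := by omega
    have htb : t - b = K * b + s := by linarith
    by_cases hcase : s = K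
    · have h1 : t - b = K * (b + 1) := by rw [htb, hcase]; ring
      have hdiv : (t - b) / K = b + 1 := by
        rw [h1]; exact Int.mul_ediv_cancel_left _ (by omega)
      have hmod' : (t - b) % K = 0 := by rw [h1]; exact Int.mul_emod_right K (b + 1)
      simp only [Function.comp]
      rw [hdiv, hmod']
      rw [if_pos (by omega), if_neg (by omega)]
      ring
    · have hsltK : s < K := lt_of_le_of_ne hsK hcase
      have hdiv : (t - b) / K = b := by
        rw [htb, Int.add_comm, Int.add_mul_ediv_left _ _ (by omega : K ≠ 0),
            Int.ediv_eq_zero_of_lt (by omega) hsltK]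
        omega
      have hmod' : (t - b) % K = s := by
        rw [htb, Int.add_comm, Int.add_mul_emod_self_left, Int.emod_eq_of_lt (by omega) hsltK]
      simp only [Function.comp]
      rw [hdiv, hmod']
      by_cases hc : K - s ≤ (i : Int)
      · rw [if_pos (by omega), if_pos hc]
      · rw [if_neg (by omega), if_neg hc]

lemma loopA_eq_psum : ∀ (k : Nat) (t rL res : Int),
    divideLoopA t rL res k = psum (rL + res) (sizes t k) := by
  intro k
  induction k with
  | zero => intro t rL res; rfl
  | succ k ih =>
    intro t rL res
    have hpos : (0 : Int) < (k : Int) + 1 := by omega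
    rw [divideLoopA]
    simp only [PySem.Int.floordiv_eq_ediv_of_pos hpos]
    rw [ih, sizes_step, psum]

lemma sizes_as_map (t n : Int) (hn : 0 < n) :
    sizes t n.toNat
      = (PySem.List.pyRange 0 n 1).map
          (fun i => PySem.Int.floordiv t n + if n - PySem.Int.mod t n ≤ i then 1 else 0) := by
  have hcast : ((n.toNat : Int)) = n := Int.toNat_of_nonneg (le_of_lt hn)
  unfold sizes
  rw [PySem.List.pyRange_one, List.map_map]
  have hlen : (n - 0).toNat = n.toNat := by omega
  rw [hlen]
  apply List.map_congr_left
  intro i _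
  simp only [Function.comp, zero_add, hcast,
    PySem.Int.floordiv_eq_ediv_of_pos hn, PySem.Int.mod_eq_emod_of_pos hn]

lemma main_core (t n : Int) (hn0 : 0 ≤ n) :
    0 :: divideLoopA t 0 0 n.toNat
      = (if n = 0 then [0]
         else 0 :: loopB (PySem.Int.floordiv t n) (n - PySem.Int.mod t n)
                (PySem.List.pyRange 0 n 1) 0) := by
  by_cases hz : n = 0
  · simp [hz, divideLoopA]
  · have hpos : 0 < n := lt_of_le_of_ne hn0 (Ne.symm hz)
    rw [if_neg hz, loopA_eq_psum, sizes_as_map t n hpos, loopB_eq_psum]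
    norm_num

-- ===== VERDICT (by name: the statement is the Claim_ definition above) =====
theorem divide_matrix_spec : Claim_equal_divide_matrix := by
  intro t p _ hpre
  obtain ⟨ht, hp⟩ := hpre
  unfold Spec_divide_matrix
  simp only [divide_matrix, divide_matrix_alt]
  have hmin : min p t = if t < p then t else p := by omega
  rw [hmin]
  exact main_core t (if t < p then t else p) (by split <;> omega)
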